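-- pv_equiv track=rewrite | github.com/nileshmantati/Django-Travelwebsite | bus_app/views.py | generate_seats_for_seater
-- ===== SOURCE A (Python) =====
-- def generate_seats_for_seater(total_seats=50):
--     columns = []
--     seats_per_column = 5
--
--     seat_no = 1
--
--     while seat_no <= total_seats:
--         col = []
--         for _ in range(seats_per_column):
--             if seat_no <= total_seats:
--                 col.append(f"S{seat_no}")
--                 seat_no += 1
--         columns.append(col[::-1])
--
--     return columns
-- ===== SOURCE B (Python) =====
-- def generate_seats_for_seater(total_seats=50):
--     labels = [f"S{i}" for i in range(1, total_seats + 1)]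
--     return [labels[i:i + 5][::-1] for i in range(0, len(labels), 5)]
-- ===== Notes on version B (the rewrite author's own statement) =====
-- stated objective: simpler
-- what changed: Replaces the seat-counting while/for loop with bounded guards by a two-phase build-all-then-reshape: construct the flat label list once, then partition it into reversed columns of 5 by slicing.
import Mathlib
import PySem

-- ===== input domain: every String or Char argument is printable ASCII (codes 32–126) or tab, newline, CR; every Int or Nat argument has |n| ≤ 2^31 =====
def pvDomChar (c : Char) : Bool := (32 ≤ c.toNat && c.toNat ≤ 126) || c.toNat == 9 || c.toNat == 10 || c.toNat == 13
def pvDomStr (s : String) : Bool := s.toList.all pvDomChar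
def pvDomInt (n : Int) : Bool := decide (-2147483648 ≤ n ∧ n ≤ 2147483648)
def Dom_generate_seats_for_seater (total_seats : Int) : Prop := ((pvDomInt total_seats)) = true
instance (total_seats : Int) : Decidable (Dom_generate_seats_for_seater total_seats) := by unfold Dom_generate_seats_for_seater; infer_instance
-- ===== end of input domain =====

-- B replaces A's seat-counting while/for loop by build-all-labels-then-reshape-by-slicing (simpler decomposition, same cost).

-- ===== PORT A =====
-- inner 'for _ in range(5)' loop of A: appends f"S{seat_no}" while seat_no <= total_seats
def pvInnerA (fuel : Nat) (total_seats seat_no : Int) (col : List String) : List String × Int :=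
  match fuel with
  | 0 => (col, seat_no)
  | f + 1 =>
    if seat_no ≤ total_seats then
      pvInnerA f total_seats (seat_no + 1) (col ++ ["S" ++ PySem.Int.toStr seat_no])
    else
      pvInnerA f total_seats seat_no col

-- cited by pvWhileA's termination proof
theorem pvInnerA_snd_ge (fuel : Nat) (t : Int) : ∀ (s : Int) (c : List String), s ≤ (pvInnerA fuel t s c).2 := by
  induction fuel with
  | zero => intro s c; simp [pvInnerA]
  | succ f ih =>
    intro s c
    simp only [pvInnerA]
    split
    · exact le_trans (by omega) (ih (s + 1) _)
    · exact ih s c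

-- the 'while seat_no <= total_seats' loop of A; col[::-1] is List.reverse (PySem.List.slice?_none_none_neg_one)
def pvWhileA (total_seats seat_no : Int) : List (List String) :=
  if h : seat_no ≤ total_seats then
    (pvInnerA 5 total_seats seat_no []).1.reverse ::
      pvWhileA total_seats (pvInnerA 5 total_seats seat_no []).2
  else []
termination_by (total_seats + 1 - seat_no).toNat
decreasing_by
  have h1 : seat_no + 1 ≤ (pvInnerA 5 total_seats seat_no []).2 := by
    simp only [pvInnerA, if_pos h]
    exact pvInnerA_snd_ge 4 total_seats (seat_no + 1) _
  omega

def generate_seats_for_seater (total_seats : Int) : List (List String) :=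
  pvWhileA total_seats 1

-- ===== PORT B =====
def generate_seats_for_seater_alt (total_seats : Int) : List (List String) :=
  let labels := (PySem.List.pyRange 1 (total_seats + 1) 1).map (fun i => "S" ++ PySem.Int.toStr i)
  (PySem.List.pyRange 0 (labels.length : Int) 5).map
    (fun i => (PySem.List.slice labels (some i) (some (i + 5))).reverse)

-- ===== PRECONDITION & SPEC =====
def Spec_generate_seats_for_seater (total_seats : Int) (out : List (List String)) : Prop := out = generate_seats_for_seater_alt total_seats
instance (total_seats : Int) (out : List (List String)) : Decidable (Spec_generate_seats_for_seater total_seats out) := by unfold Spec_generate_seats_for_seater; infer_instance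

-- ===== CLAIM (what is proved, stated in full; the proofs are below) =====
def Claim_equal_generate_seats_for_seater : Prop := ∀ (total_seats : Int), Dom_generate_seats_for_seater total_seats → Spec_generate_seats_for_seater total_seats (generate_seats_for_seater total_seats)

-- ===== LEMMAS AND PROOFS =====

-- the common normal form: chunk a flat list into reversed blocks of 5
def pvChunks (l : List String) : List (List String) :=
  if l = [] then [] else (l.take 5).reverse :: pvChunks (l.drop 5)
termination_by l.length
decreasing_by
  rename_i h
  have : l.length ≠ 0 := by simpa using h
  simp [List.length_drop]; omega

-- the labels S s, S (s+1), …, S (s+n-1)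
def pvLabs (s : Int) (n : Nat) : List String :=
  (List.range n).map (fun (k : Nat) => "S" ++ PySem.Int.toStr (s + (k : Int)))

theorem pvLabs_take (s : Int) (n m : Nat) : (pvLabs s n).take m = pvLabs s (min m n) := by
  rw [pvLabs, pvLabs, ← List.map_take, List.take_range]

theorem pvLabs_drop (s : Int) (n m : Nat) : (pvLabs s n).drop m = pvLabs (s + m) (n - m) := by
  apply List.ext_getElem
  · simp [pvLabs]
  · intro i h1 h2
    simp only [pvLabs, List.getElem_drop, List.getElem_map, List.getElem_range]
    congr 1
    push_cast
    ring

theorem pvInnerA_spec (t : Int) : ∀ (f : Nat) (s : Int) (c : List String),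
    pvInnerA f t s c = (c ++ pvLabs s (min f (t + 1 - s).toNat), s + (min f (t + 1 - s).toNat : Nat)) := by
  intro f
  induction f with
  | zero => intro s c; simp [pvInnerA, pvLabs]
  | succ f ih =>
    intro s c
    by_cases h : s ≤ t
    · have hm : min (f + 1) (t + 1 - s).toNat = (min f (t + 1 - (s + 1)).toNat) + 1 := by omega
      rw [pvInnerA, if_pos h, ih, hm]
      simp only [Prod.mk.injEq]
      constructor
      · rw [List.append_assoc]
        congr 1
        conv_rhs => rw [pvLabs, List.range_succ_eq_map, List.map_cons, List.map_map]
        simp only [List.singleton_append, Nat.cast_zero, add_zero]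
        congr 1
        rw [pvLabs]
        apply List.map_congr_left
        intro k _
        simp only [Function.comp_apply]
        congr 2
        push_cast
        ring
      · push_cast
        ring
    · have hm : min (f + 1) (t + 1 - s).toNat = 0 := by omega
      have hm2 : min f (t + 1 - s).toNat = 0 := by omega
      rw [pvInnerA, if_neg h, ih, hm, hm2]

theorem pvWhileA_spec (t : Int) : ∀ (n : Nat) (s : Int), (t + 1 - s).toNat = n →
    pvWhileA t s = pvChunks (pvLabs s n) := by
  intro n
  induction n using Nat.strong_induction_on with
  | _ n ih =>
    intro s hn
    by_cases h : s ≤ t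
    · have hn1 : 1 ≤ n := by omega
      rw [pvWhileA, dif_pos h, pvInnerA_spec]
      have hne : pvLabs s n ≠ [] := by
        simp only [pvLabs, ne_eq, List.map_eq_nil_iff, List.range_eq_nil]
        omega
      rw [pvChunks, if_neg hne, hn]
      simp only [List.nil_append]
      congr 1
      · simp [pvLabs_take]
      · simp only [pvLabs_drop]
        have hdrop : n - 5 = n - min 5 n := by omega
        have hrec : (t + 1 - (s + (min 5 n : Nat))).toNat = n - min 5 n := by omega
        rw [ih (n - min 5 n) (by omega) (s + (min 5 n : Nat)) hrec, hdrop]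
        by_cases h5 : 5 ≤ n
        · rw [show min 5 n = 5 from by omega]
        · have hz : n - min 5 n = 0 := by omega
          rw [hz]
          simp [pvLabs]
    · have hn0 : n = 0 := by omega
      rw [pvWhileA, dif_neg h, hn0]
      simp [pvLabs, pvChunks]

-- one block of B: labels[i:i+5] for a natural i is drop-then-take
theorem pvSliceBlock (l : List String) (j : Nat) :
    PySem.List.slice l (some (j : Int)) (some ((j : Int) + 5)) = (l.drop j).take 5 := by
  simpa using PySem.List.slice_natCast_add l j 5

-- B's chunking comprehension computes pvChunks
theorem pvAlt_chunks : ∀ (n : Nat) (l : List String), l.length ≤ n →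
    (PySem.List.pyRange 0 (l.length : Int) 5).map
      (fun i => (PySem.List.slice l (some i) (some (i + 5))).reverse) = pvChunks l := by
  intro n
  induction n with
  | zero =>
    intro l hl
    have h0 : l = [] := by
      cases l with
      | nil => rfl
      | cons a l => simp at hl
    subst h0
    simp [pvChunks, PySem.List.pyRange_of_pos 0 0 (by norm_num : (0:Int) < 5)]
  | succ n ih =>
    intro l hl
    by_cases h0 : l = []
    · subst h0
      simp [pvChunks, PySem.List.pyRange_of_pos 0 0 (by norm_num : (0:Int) < 5)]
    · have hL : 0 < l.length := List.length_pos_of_ne_nil h0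
      rw [PySem.List.pyRange_of_pos 0 (l.length : Int) (by norm_num : (0:Int) < 5),
        if_pos (by exact_mod_cast hL), List.map_map]
      have hc1 : 1 ≤ (((l.length : Int) - 0 + 5 - 1) / 5).toNat := by omega
      rw [show (((l.length : Int) - 0 + 5 - 1) / 5).toNat
            = ((((l.length : Int) - 0 + 5 - 1) / 5).toNat - 1) + 1 from by omega,
        List.range_succ_eq_map, List.map_cons, List.map_map]
      rw [pvChunks, if_neg h0]
      congr 1
      · have hhead : PySem.List.slice l (some 0) (some 5) = l.take 5 := by
          simpa using pvSliceBlock l 0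
        simp only [Function.comp_apply, Nat.cast_zero, mul_zero, zero_add, hhead]
      · rw [← ih (l.drop 5) (by simp; omega),
          PySem.List.pyRange_of_pos 0 ((l.drop 5).length : Int) (by norm_num : (0:Int) < 5)]
        have hdl : (l.drop 5).length = l.length - 5 := by simp
        by_cases h5 : 5 < l.length
        · rw [if_pos (by rw [hdl]; exact_mod_cast (by omega : (0:Int) < ((l.length - 5 : Nat) : Int)))]
          have hcount : ((((l.drop 5).length : Int) - 0 + 5 - 1) / 5).toNat
              = (((l.length : Int) - 0 + 5 - 1) / 5).toNat - 1 := by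
            rw [hdl]
            push_cast [Nat.cast_sub (by omega : 5 ≤ l.length)]
            omega
          rw [hcount, List.map_map]
          apply List.map_congr_left
          intro k _
          simp only [Function.comp_apply]
          have e1 : (0 : Int) + 5 * ((k + 1 : Nat) : Int) = ((5 + 5 * k : Nat) : Int) := by
            push_cast; ring
          have e2 : (0 : Int) + 5 * ((k : Nat) : Int) = ((5 * k : Nat) : Int) := by
            push_cast; ring
          rw [e1, e2, pvSliceBlock, pvSliceBlock, List.drop_drop]
        · have hc' : (((l.length : Int) - 0 + 5 - 1) / 5).toNat = 1 := by omega
          have hcond : ¬ ((0:Int) < (((l.drop 5).length : Nat) : Int)) := by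
            rw [hdl]; omega
          rw [if_neg hcond]
          have hnil : l.drop 5 = [] := by
            cases hh : l.drop 5 with
            | nil => rfl
            | cons a m =>
              have := congrArg List.length hh
              simp at this
              omega
          have hz : (((l.length : Int) - 0 + 5 - 1) / 5).toNat - 1 = 0 := by omega
          rw [hz, hnil]
          simp

theorem pvLabels_eq (t : Int) :
    (PySem.List.pyRange 1 (t + 1) 1).map (fun i => "S" ++ PySem.Int.toStr i) = pvLabs 1 t.toNat := by
  rw [PySem.List.pyRange_one, List.map_map, pvLabs,
    show (t + 1 - 1).toNat = t.toNat from by omega]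
  rfl

-- ===== VERDICT (by name: the statement is the Claim_ definition above) =====
theorem generate_seats_for_seater_spec : Claim_equal_generate_seats_for_seater := by
  intro t _
  unfold Spec_generate_seats_for_seater generate_seats_for_seater generate_seats_for_seater_alt
  rw [pvWhileA_spec t t.toNat 1 (by omega)]
  simp only [pvLabels_eq]
  rw [pvAlt_chunks (pvLabs 1 t.toNat).length _ le_rfl]
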